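-- pv_equiv track=rewrite | github.com/I0amLK/2th-and-3th-moment-subset-sum-question | check_ineq.py | generate_prime_powers
-- ===== SOURCE A (Python) =====
-- from typing import Dict, List, Optional, Tuple
--
-- Q_MIN = 17
--
-- Q_MAX = 5381
--
-- CHAR_MIN = 5
--
-- def is_prime(n: int) -> bool:
--     """Return True iff n is prime."""
--     if n < 2:
--         return False
--
--     if n % 2 == 0:
--         return n == 2
--
--     if n % 3 == 0:
--         return n == 3
--
--     i = 5
--     while i * i <= n:
--         if n % i == 0 or n % (i + 2) == 0:
--             return False
--         i += 6
--
--     return True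
--
-- def generate_prime_powers(
--     lo: int = Q_MIN,
--     hi: int = Q_MAX,
--     char_min: int = CHAR_MIN,
-- ) -> List[Tuple[int, int, int]]:
--     """
--     Return sorted list of (q, p, s), where q = p^s,
--     p is prime, and p >= char_min.
--     """
--     cases = []
--     seen = set()
--
--     for p in range(char_min, hi + 1):
--         if not is_prime(p):
--             continue
--
--         q = p
--         s = 1
--
--         while q <= hi:
--             if q >= lo and q not in seen:
--                 seen.add(q)
--                 cases.append((q, p, s))
--
--             q *= p
--             s += 1
--
--     cases.sort()
--     return cases
-- ===== SOURCE B (Python) =====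
-- def generate_prime_powers(lo=17, hi=5381, char_min=5):
--     cases = []
--     start = max(char_min, 2)
--     if start <= hi:
--         sieve = bytearray([1]) * (hi + 1)
--         sieve[0:2] = b"\x00\x00"
--         i = 2
--         while i * i <= hi:
--             if sieve[i]:
--                 sieve[i * i :: i] = bytes(len(range(i * i, hi + 1, i)))
--             i += 1
--         for p in range(start, hi + 1):
--             if sieve[p]:
--                 q, s = p, 1
--                 while q <= hi:
--                     if q >= lo:
--                         cases.append((q, p, s))
--                     q *= p
--                     s += 1
--     cases.sort()
--     return cases
-- ===== Notes on version B (the rewrite author's own statement) =====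
-- stated objective: faster
-- what changed: Replaces per-number 6k±1 trial division and the 'seen' dedup set with a Sieve of Eratosthenes (bytearray slice marking) over [0,hi] followed by multiplying out the powers of each sieved prime, skipping all work when max(char_min,2) > hi; intended as faster: a timing run measured a ~10x-29x median ratio at its largest size (on inputs whose scanned range is empty both functions are near-instant, so those read as noise).
import Mathlib
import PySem

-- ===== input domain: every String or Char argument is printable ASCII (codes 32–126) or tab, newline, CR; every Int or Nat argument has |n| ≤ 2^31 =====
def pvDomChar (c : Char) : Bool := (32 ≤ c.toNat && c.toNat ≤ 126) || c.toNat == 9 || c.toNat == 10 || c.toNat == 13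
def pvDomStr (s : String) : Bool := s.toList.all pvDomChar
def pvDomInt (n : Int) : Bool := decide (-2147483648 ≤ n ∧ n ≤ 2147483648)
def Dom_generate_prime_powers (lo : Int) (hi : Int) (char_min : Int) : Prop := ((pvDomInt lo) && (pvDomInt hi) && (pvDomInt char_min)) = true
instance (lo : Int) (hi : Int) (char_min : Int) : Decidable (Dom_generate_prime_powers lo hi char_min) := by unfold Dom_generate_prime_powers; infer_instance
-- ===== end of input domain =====

-- B replaces A's per-number 6k±1 trial division (and its redundant 'seen' set) by a
-- Sieve of Eratosthenes over [0,hi], then multiplies out the powers of each sieved prime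
-- (objective: faster; intended as faster — a timing run measured a ~10x-29x median
-- ratio at its largest input size; on inputs whose scanned range is empty both functions
-- are near-instant).

-- ===== PORT A =====

-- small arithmetic facts cited by the ports' termination proofs and hypothesis arguments
-- (named so that the definitions' bodies stay small)
theorem pv_meas6 {n i : Int} (h5 : 5 ≤ i) (hg : i * i ≤ n) :
    (n + 1 - (i + 6) * (i + 6)).toNat < (n + 1 - i * i).toNat := by
  have h1 : i * i + 1 ≤ (i + 6) * (i + 6) := by nlinarith
  generalize (i + 6) * (i + 6) = b at *
  generalize i * i = a at *
  omega

theorem pv_one_le_mul {p q : Int} (hp : 2 ≤ p) (hq : 1 ≤ q) : 1 ≤ q * p := by nlinarith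

theorem pv_meas_mul {hi p q : Int} (hp : 2 ≤ p) (hq : 1 ≤ q) (h : q ≤ hi) :
    (hi + 1 - q * p).toNat < (hi + 1 - q).toNat := by
  have h1 : q + 1 ≤ q * p := by nlinarith
  generalize q * p = r at h1 ⊢
  omega

theorem pv_meas_succ {hi p : Int} (h : p ≤ hi) :
    (hi + 1 - (p + 1)).toNat < (hi + 1 - p).toNat := by omega

theorem pv_meas_add {n i j : Int} (h2 : 2 ≤ i) (h : j ≤ n) :
    (n + 1 - (j + i)).toNat < (n + 1 - j).toNat := by omega

theorem pv_meas_sq {n i : Int} (h2 : 2 ≤ i) (hg : i * i ≤ n) :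
    (n + 1 - (i + 1)).toNat < (n + 1 - i).toNat := by
  have h1 : i ≤ i * i := by nlinarith
  generalize i * i = a at *
  omega

theorem pv_five_le_five : (5 : Int) ≤ 5 := le_refl 5

theorem pv_add_six {i : Int} (h : 5 ≤ i) : 5 ≤ i + 6 := by omega

theorem pv_two_le_succ {p : Int} (h : 2 ≤ p) : 2 ≤ p + 1 := by omega

theorem pv_one_le {p : Int} (h : 2 ≤ p) : 1 ≤ p := by omega


-- the 'while i * i <= n' trial-division loop of is_prime; the hypothesis 5 ≤ i only
-- supports termination (i starts at 5 and grows by 6)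
def is_prime_loop (n : Int) (i : Int) (h5 : 5 ≤ i) : Bool :=
  if h : i * i ≤ n then
    if PySem.Int.mod n i == 0 || PySem.Int.mod n (i + 2) == 0 then false
    else is_prime_loop n (i + 6) (pv_add_six h5)
  else true
termination_by (n + 1 - i * i).toNat
decreasing_by exact pv_meas6 h5 h

def is_prime (n : Int) : Bool :=
  if n < 2 then false
  else if PySem.Int.mod n 2 == 0 then n == 2
  else if PySem.Int.mod n 3 == 0 then n == 3
  else is_prime_loop n 5 pv_five_le_five

-- termination-support fact cited by mainA below (A only reaches the inner loop for primes)
theorem pv_two_le_of_is_prime {p : Int} (h : is_prime p = true) : 2 ≤ p := by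
  rcases lt_or_ge p 2 with hlt | hge
  · rw [is_prime, if_pos hlt] at h
    cases h
  · exact hge

-- the inner 'while q <= hi' loop of A, threading (cases, seen); hypotheses support termination
def loopA (hi lo p q s : Int) (cases : List (Int × Int × Int)) (seen : PySem.Set Int)
    (hp : 2 ≤ p) (hq : 1 ≤ q) : List (Int × Int × Int) × PySem.Set Int :=
  if h : q ≤ hi then
    if lo ≤ q ∧ ¬ (PySem.Set.contains seen q = true) then
      loopA hi lo p (q * p) (s + 1) (cases ++ [(q, p, s)]) (PySem.Set.add seen q) hp
        (pv_one_le_mul hp hq)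
    else
      loopA hi lo p (q * p) (s + 1) cases seen hp (pv_one_le_mul hp hq)
  else (cases, seen)
termination_by (hi + 1 - q).toNat
decreasing_by all_goals exact pv_meas_mul hp hq h

-- 'for p in range(char_min, hi + 1)' of A
def mainA (hi lo p : Int) (cases : List (Int × Int × Int)) (seen : PySem.Set Int) :
    List (Int × Int × Int) × PySem.Set Int :=
  if h : p ≤ hi then
    if hp : is_prime p = true then
      let r := loopA hi lo p p 1 cases seen (pv_two_le_of_is_prime hp)
        (pv_one_le (pv_two_le_of_is_prime hp))
      mainA hi lo (p + 1) r.1 r.2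
    else mainA hi lo (p + 1) cases seen
  else (cases, seen)
termination_by (hi + 1 - p).toNat
decreasing_by all_goals exact pv_meas_succ h

-- cases.sort(): ported as a stable sort by the first component; exact here because the
-- first components (the q's) of the built list are pairwise distinct, and tuples with
-- distinct first components compare by the first component
def generate_prime_powers (lo : Int) (hi : Int) (char_min : Int) : List (Int × Int × Int) :=
  PySem.List.sorted (mainA hi lo char_min [] PySem.Set.empty).1 (fun x => x.1) false

-- ===== PORT B =====

-- the slice assignment 'sieve[i*i::i] = zeros', read elementwise: positions i*i, i*i+i, … ≤ hi
-- are set to False (2 ≤ i supports termination)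
def markB (n i : Int) (j : Int) (sieve : List Bool) (h2 : 2 ≤ i) : List Bool :=
  if h : j ≤ n then markB n i (j + i) (sieve.set j.toNat false) h2
  else sieve
termination_by (n + 1 - j).toNat
decreasing_by exact pv_meas_add h2 h

-- 'while i * i <= hi' sieving loop ('if sieve[i]: sieve[i*i::i] = zeros')
def sieveLoopB (n i : Int) (sieve : List Bool) (h2 : 2 ≤ i) : List Bool :=
  if h : i * i ≤ n then
    sieveLoopB n (i + 1)
      (if sieve.getD i.toNat false = true then markB n i (i * i) sieve h2 else sieve)
      (pv_two_le_succ h2)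
  else sieve
termination_by (n + 1 - i).toNat
decreasing_by exact pv_meas_sq h2 h

-- the inner 'while q <= hi' loop of B
def loopB (hi lo p q s : Int) (cases : List (Int × Int × Int)) (hp : 2 ≤ p) (hq : 1 ≤ q) :
    List (Int × Int × Int) :=
  if h : q ≤ hi then
    if lo ≤ q then loopB hi lo p (q * p) (s + 1) (cases ++ [(q, p, s)]) hp (pv_one_le_mul hp hq)
    else loopB hi lo p (q * p) (s + 1) cases hp (pv_one_le_mul hp hq)
  else cases
termination_by (hi + 1 - q).toNat
decreasing_by all_goals exact pv_meas_mul hp hq h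

-- 'for p in range(max(char_min, 2), hi + 1)' of B
def mainB (hi lo : Int) (sieve : List Bool) (p : Int) (cases : List (Int × Int × Int))
    (hp : 2 ≤ p) : List (Int × Int × Int) :=
  if h : p ≤ hi then
    if sieve.getD p.toNat false = true then
      mainB hi lo sieve (p + 1) (loopB hi lo p p 1 cases hp (pv_one_le hp)) (pv_two_le_succ hp)
    else mainB hi lo sieve (p + 1) cases (pv_two_le_succ hp)
  else cases
termination_by (hi + 1 - p).toNat
decreasing_by all_goals exact pv_meas_succ h

-- cases.sort(): same stable sort by the first component as in port A (first components distinct)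
def generate_prime_powers_alt (lo : Int) (hi : Int) (char_min : Int) : List (Int × Int × Int) :=
  PySem.List.sorted
    (if h : max char_min 2 ≤ hi then
      mainB hi lo
        (sieveLoopB hi 2 (((List.replicate (hi + 1).toNat true).set 0 false).set 1 false)
          (le_refl 2))
        (max char_min 2) [] (le_max_right _ _)
    else [])
    (fun x => x.1) false

-- ===== PRECONDITION & SPEC =====
def Spec_generate_prime_powers (lo : Int) (hi : Int) (char_min : Int) (out : List (Int × Int × Int)) : Prop := out = generate_prime_powers_alt lo hi char_min
instance (lo : Int) (hi : Int) (char_min : Int) (out : List (Int × Int × Int)) : Decidable (Spec_generate_prime_powers lo hi char_min out) := by unfold Spec_generate_prime_powers; infer_instance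

-- ===== CLAIM (what is proved, stated in full; the proofs are below) =====
def Claim_equal_generate_prime_powers : Prop := ∀ (lo : Int) (hi : Int) (char_min : Int), Dom_generate_prime_powers lo hi char_min → Spec_generate_prime_powers lo hi char_min (generate_prime_powers lo hi char_min)

-- ===== LEMMAS AND PROOFS =====

-- 'no divisor d with 2 ≤ d and d*d ≤ t': the primality notion both the 6k±1 trial-division
-- loop of A and the sieve of B decide
def NoDiv (t : Int) : Prop := ∀ d : Int, 2 ≤ d → d ∣ t → ¬ d * d ≤ t

def IntPrime (t : Int) : Prop := 2 ≤ t ∧ NoDiv t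

theorem nat_noDiv_prime {m : Nat} (h2 : 2 ≤ m) :
    m.Prime ↔ ∀ d : Nat, 2 ≤ d → d ∣ m → ¬ d * d ≤ m := by
  constructor
  · intro hp d hd hdvd hsq
    rcases hp.eq_one_or_self_of_dvd d hdvd with h1 | h1
    · omega
    · subst h1
      nlinarith
  · intro hnd
    by_contra hnp
    have hmf := Nat.minFac_dvd m
    have hpf := Nat.minFac_prime (show m ≠ 1 by omega)
    have hsq := Nat.minFac_sq_le_self (show 0 < m by omega) hnp
    rw [pow_two] at hsq
    exact hnd m.minFac hpf.two_le hmf hsq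

theorem intPrime_iff {t : Int} : IntPrime t ↔ 2 ≤ t ∧ t.toNat.Prime := by
  constructor
  · rintro ⟨h2, hnd⟩
    refine ⟨h2, (nat_noDiv_prime (by omega)).mpr ?_⟩
    intro d hd hdvd hsq
    refine hnd (d : Int) (by exact_mod_cast hd) ?_ ?_
    · have h : (d : Int) ∣ (t.toNat : Int) := by exact_mod_cast hdvd
      rwa [Int.toNat_of_nonneg (by omega)] at h
    · have h : ((d * d : Nat) : Int) ≤ ((t.toNat : Nat) : Int) := by exact_mod_cast hsq
      push_cast at h
      rwa [Int.toNat_of_nonneg (by omega)] at h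
  · rintro ⟨h2, hp⟩
    refine ⟨h2, ?_⟩
    intro d hd hdvd hsq
    have e1 : ((d.toNat : Int)) = d := Int.toNat_of_nonneg (by omega)
    have e2 : ((t.toNat : Int)) = t := Int.toNat_of_nonneg (by omega)
    have hd' : d.toNat ∣ t.toNat := by
      have h : (d.toNat : Int) ∣ (t.toNat : Int) := by rw [e1, e2]; exact hdvd
      exact_mod_cast h
    have hsq' : d.toNat * d.toNat ≤ t.toNat := by
      rw [← e1, ← e2] at hsq
      exact_mod_cast hsq
    exact (nat_noDiv_prime (by omega)).mp hp d.toNat (by omega) hd' hsq'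

theorem pow_ne_of_primes {p p' : Int} (hp : IntPrime p) (hp' : IntPrime p') (hne : p ≠ p')
    {k k' : Nat} (hk : 1 ≤ k) (hk' : 1 ≤ k') : p ^ k ≠ p' ^ k' := by
  intro heq
  have hA := (intPrime_iff.mp hp).2
  have hB := (intPrime_iff.mp hp').2
  have e1 : ((p.toNat : Int)) = p := Int.toNat_of_nonneg (by have := hp.1; omega)
  have e2 : ((p'.toNat : Int)) = p' := Int.toNat_of_nonneg (by have := hp'.1; omega)
  have hnat : p.toNat ^ k = p'.toNat ^ k' := by
    have h : ((p.toNat ^ k : Nat) : Int) = ((p'.toNat ^ k' : Nat) : Int) := by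
      push_cast
      rw [e1, e2]
      exact heq
    exact_mod_cast h
  have hdvd : p.toNat ∣ p'.toNat ^ k' := hnat ▸ dvd_pow_self p.toNat (by omega : k ≠ 0)
  have hdd := hA.dvd_of_dvd_pow hdvd
  have heqn := (Nat.prime_dvd_prime_iff_eq hA hB).mp hdd
  apply hne
  rw [← e1, ← e2, heqn]

theorem is_prime_of_lt_two {p : Int} (h : p < 2) : is_prime p = false := by
  rw [is_prime, if_pos h]

theorem loop_true_aux (n : Int) :
    ∀ (N : Nat) (i : Int) (h5 : 5 ≤ i), (n + 1 - i * i).toNat = N → i % 6 = 5 →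
    is_prime_loop n i h5 = true → ∀ j : Int, j ∣ n →
    ¬ ((j % 6 = 5 ∧ i ≤ j ∧ j * j ≤ n) ∨ (j % 6 = 1 ∧ i ≤ j - 2 ∧ (j - 2) * (j - 2) ≤ n)) := by
  intro N
  induction N using Nat.strong_induction_on with
  | _ N IH =>
  intro i h5 hN hmod htrue j hdvd hcase
  by_cases hg : i * i ≤ n
  · rw [is_prime_loop, dif_pos hg] at htrue
    by_cases hchk : (PySem.Int.mod n i == 0 || PySem.Int.mod n (i + 2) == 0) = true
    · rw [if_pos hchk] at htrue
      cases htrue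
    · rw [if_neg hchk] at htrue
      have hnd1 : ¬ i ∣ n := fun hd =>
        hchk (by simp [(PySem.Int.mod_eq_zero_iff_dvd n i).mpr hd])
      have hnd2 : ¬ (i + 2) ∣ n := fun hd =>
        hchk (by simp [(PySem.Int.mod_eq_zero_iff_dvd n (i + 2)).mpr hd])
      rcases hcase with ⟨hj5, hij, hjj⟩ | ⟨hj1, hij, hjj⟩
      · rcases eq_or_lt_of_le hij with heq | hlt
        · exact hnd1 (by rw [heq]; exact hdvd)
        · exact IH _ (hN ▸ pv_meas6 h5 hg) (i + 6) (by omega) rfl (by omega) htrue j hdvd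
            (Or.inl ⟨hj5, by omega, hjj⟩)
      · rcases eq_or_lt_of_le hij with heq | hlt
        · exact hnd2 (by rw [show i + 2 = j by omega]; exact hdvd)
        · exact IH _ (hN ▸ pv_meas6 h5 hg) (i + 6) (by omega) rfl (by omega) htrue j hdvd
            (Or.inr ⟨hj1, by omega, hjj⟩)
  · rcases hcase with ⟨_, hij, hjj⟩ | ⟨_, hij, hjj⟩
    · have hsq : i * i ≤ j * j := mul_le_mul hij hij (by omega) (by omega)
      linarith
    · have hsq : i * i ≤ (j - 2) * (j - 2) := mul_le_mul hij hij (by omega) (by omega)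
      linarith

theorem loop_complete_aux (n : Int) :
    ∀ (N : Nat) (i : Int) (h5 : 5 ≤ i), (n + 1 - i * i).toNat = N → i % 6 = 5 →
    (∀ j : Int, j ∣ n →
      ¬ ((j % 6 = 5 ∧ i ≤ j ∧ j * j ≤ n) ∨ (j % 6 = 1 ∧ i ≤ j - 2 ∧ (j - 2) * (j - 2) ≤ n))) →
    is_prime_loop n i h5 = true := by
  intro N
  induction N using Nat.strong_induction_on with
  | _ N IH =>
  intro i h5 hN hmod hno
  rw [is_prime_loop]
  by_cases hg : i * i ≤ n
  · rw [dif_pos hg]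
    have hnd1 : ¬ i ∣ n := fun hd => hno i hd (Or.inl ⟨hmod, le_refl i, hg⟩)
    have hnd2 : ¬ (i + 2) ∣ n := fun hd =>
      hno (i + 2) hd (Or.inr ⟨by omega, by omega, by rw [show i + 2 - 2 = i by omega]; exact hg⟩)
    rw [if_neg]
    · exact IH _ (hN ▸ pv_meas6 h5 hg) (i + 6) (by omega) rfl (by omega)
        (fun j hj hc => hno j hj (by
          rcases hc with ⟨a, b, c⟩ | ⟨a, b, c⟩
          · exact Or.inl ⟨a, by omega, c⟩
          · exact Or.inr ⟨a, by omega, c⟩))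
    · simp only [Bool.or_eq_true, beq_iff_eq, PySem.Int.mod_eq_zero_iff_dvd]
      rintro (h | h)
      · exact hnd1 h
      · exact hnd2 h
  · rw [dif_neg hg]

theorem is_prime_iff (n : Int) : is_prime n = true ↔ IntPrime n := by
  by_cases h2 : n < 2
  · rw [is_prime, if_pos h2]
    constructor
    · intro h; cases h
    · rintro ⟨ha, -⟩; omega
  · rw [is_prime, if_neg h2]
    by_cases hm2 : PySem.Int.mod n 2 = 0
    · have hdvd2 : (2 : Int) ∣ n := (PySem.Int.mod_eq_zero_iff_dvd n 2).mp hm2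
      rw [if_pos (by simp only [beq_iff_eq]; exact hm2)]
      simp only [beq_iff_eq]
      constructor
      · rintro rfl
        exact ⟨by omega, fun d hd hdvd hsq => by
          have := Int.le_of_dvd (by omega) hdvd
          nlinarith⟩
      · rintro ⟨-, hnd⟩
        by_contra hne
        exact hnd 2 (by omega) hdvd2 (by omega)
    · rw [if_neg (by simp only [beq_iff_eq]; exact hm2)]
      have hnd2 : ¬ (2 : Int) ∣ n := fun hd => hm2 ((PySem.Int.mod_eq_zero_iff_dvd n 2).mpr hd)
      by_cases hm3 : PySem.Int.mod n 3 = 0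
      · have hdvd3 : (3 : Int) ∣ n := (PySem.Int.mod_eq_zero_iff_dvd n 3).mp hm3
        rw [if_pos (by simp only [beq_iff_eq]; exact hm3)]
        simp only [beq_iff_eq]
        constructor
        · rintro rfl
          exact ⟨by omega, fun d hd hdvd hsq => by
            have := Int.le_of_dvd (by omega) hdvd
            nlinarith⟩
        · rintro ⟨-, hnd⟩
          by_contra hne
          exact hnd 3 (by omega) hdvd3 (by omega)
      · rw [if_neg (by simp only [beq_iff_eq]; exact hm3)]
        have hnd3 : ¬ (3 : Int) ∣ n := fun hd => hm3 ((PySem.Int.mod_eq_zero_iff_dvd n 3).mpr hd)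
        have h5 : 5 ≤ n := by omega
        constructor
        · intro htrue
          refine ⟨by omega, ?_⟩
          intro d hdge hdvd hsq
          have hd2 : ¬ (2 : Int) ∣ d := fun h => hnd2 (h.trans hdvd)
          have hd3 : ¬ (3 : Int) ∣ d := fun h => hnd3 (h.trans hdvd)
          have hd5 : 5 ≤ d := by omega
          rcases (by omega : d % 6 = 1 ∨ d % 6 = 5) with hm | hm
          · exact loop_true_aux n _ 5 (by omega) rfl (by omega) htrue d hdvd
              (Or.inr ⟨hm, by omega, by nlinarith⟩)
          · exact loop_true_aux n _ 5 (by omega) rfl (by omega) htrue d hdvd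
              (Or.inl ⟨hm, by omega, hsq⟩)
        · rintro ⟨-, hnd⟩
          apply loop_complete_aux n _ 5 (by omega) rfl (by omega)
          intro j hjdvd hcase
          rcases hcase with ⟨hj5, hij, hjj⟩ | ⟨hj1, hij, hjj⟩
          · exact hnd j (by omega) hjdvd hjj
          · by_cases hjn : j * j ≤ n
            · exact hnd j (by omega) hjdvd hjn
            · obtain ⟨c, hc⟩ := hjdvd
              have hj7 : 7 ≤ j := by omega
              have hcpos : 1 ≤ c := by
                by_contra hcn
                have hc0 : c ≤ 0 := by omega
                have : j * c ≤ 0 := mul_nonpos_of_nonneg_of_nonpos (by omega) hc0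
                omega
              rcases eq_or_lt_of_le hcpos with hc1 | hc2
              · have hnj : n = j := by rw [hc, ← hc1, mul_one]
                nlinarith
              · have hclt : c < j := by
                  have hlt : j * c < j * j := by
                    rw [← hc]
                    omega
                  exact lt_of_mul_lt_mul_left hlt (by omega)
                have hcc : c * c ≤ n := by
                  have h1 : c * c ≤ c * j := mul_le_mul_of_nonneg_left (by omega) (by omega)
                  have h2' : c * j = n := by rw [hc]; ring
                  omega
                exact hnd c (by omega) ⟨j, by rw [hc]; ring⟩ hcc

-- ----- the sieve of B computes IntPrime -----

theorem markB_length (n i : Int) (h2 : 2 ≤ i) :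
    ∀ (N : Nat) (j : Int) (sieve : List Bool), (n + 1 - j).toNat = N →
    (markB n i j sieve h2).length = sieve.length := by
  intro N
  induction N using Nat.strong_induction_on with
  | _ N IH =>
  intro j sieve hN
  rw [markB]
  by_cases hj : j ≤ n
  · rw [dif_pos hj]
    rw [IH _ (by omega) _ _ rfl, List.length_set]
  · rw [dif_neg hj]

theorem markB_getD (n i : Int) (h2 : 2 ≤ i) :
    ∀ (N : Nat) (j : Int) (sieve : List Bool), (n + 1 - j).toNat = N →
    (sieve.length : Int) = n + 1 → 0 ≤ j →
    ∀ t : Nat, (t : Int) ≤ n →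
    (markB n i j sieve h2).getD t false =
      (sieve.getD t false && !decide (j ≤ (t : Int) ∧ i ∣ ((t : Int) - j))) := by
  intro N
  induction N using Nat.strong_induction_on with
  | _ N IH =>
  intro j sieve hN hlen hj0 t ht
  rw [markB]
  by_cases hj : j ≤ n
  · rw [dif_pos hj]
    rw [IH _ (by omega) (j + i) (sieve.set j.toNat false) rfl
      (by rw [List.length_set]; exact hlen) (by omega) t ht]
    by_cases hteq : (t : Int) = j
    · have htlt : t < sieve.length := by omega
      have hjt : j.toNat = t := by omega
      have hset : (sieve.set j.toNat false).getD t false = false := by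
        simp [List.getD_eq_getElem?_getD, hjt, htlt]
      have hdec : (decide (j ≤ (t : Int) ∧ i ∣ ((t : Int) - j))) = true := by
        simp only [decide_eq_true_eq]
        exact ⟨by omega, by rw [show (t : Int) - j = 0 by omega]; exact dvd_zero i⟩
      rw [hset, hdec]
      simp
    · have hset : (sieve.set j.toNat false).getD t false = sieve.getD t false := by
        have hne : j.toNat ≠ t := by omega
        simp [List.getD_eq_getElem?_getD, hne]
      rw [hset]
      have hiff : (j + i ≤ (t : Int) ∧ i ∣ ((t : Int) - (j + i))) ↔
          (j ≤ (t : Int) ∧ i ∣ ((t : Int) - j)) := by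
        constructor
        · rintro ⟨h1, hd⟩
          refine ⟨by omega, ?_⟩
          have hh := dvd_add hd (dvd_refl i)
          rwa [show (t : Int) - (j + i) + i = (t : Int) - j by ring] at hh
        · rintro ⟨h1, hd⟩
          have hlt : j < (t : Int) := by omega
          have hge : i ≤ (t : Int) - j := Int.le_of_dvd (by omega) hd
          refine ⟨by omega, ?_⟩
          have hh := dvd_sub hd (dvd_refl i)
          rwa [show (t : Int) - j - i = (t : Int) - (j + i) by ring] at hh
      rw [decide_eq_decide.mpr hiff]
  · rw [dif_neg hj]
    have hdec : decide (j ≤ (t : Int) ∧ i ∣ ((t : Int) - j)) = false := by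
      simp only [decide_eq_false_iff_not]
      rintro ⟨h1, -⟩
      omega
    rw [hdec]
    simp

theorem sieveLoopB_getD (n : Int) :
    ∀ (N : Nat) (i : Int) (sieve : List Bool) (h2 : 2 ≤ i), (n + 1 - i).toNat = N →
    (sieve.length : Int) = n + 1 →
    (∀ t : Nat, (t : Int) ≤ n →
      (sieve.getD t false = true ↔
        (2 ≤ (t : Int) ∧ ∀ d : Int, 2 ≤ d → d < i → d ∣ (t : Int) → ¬ d * d ≤ (t : Int)))) →
    ∀ t : Nat, (t : Int) ≤ n →
      ((sieveLoopB n i sieve h2).getD t false = true ↔ (2 ≤ (t : Int) ∧ NoDiv (t : Int))) := by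
  intro N
  induction N using Nat.strong_induction_on with
  | _ N IH =>
  intro i sieve h2 hN hlen hstate t ht
  rw [sieveLoopB]
  by_cases hg : i * i ≤ n
  · rw [dif_pos hg]
    have him : i ≤ n := by nlinarith
    have hii : i ≤ i * i := by nlinarith
    by_cases hguard : sieve.getD i.toNat false = true
    · rw [if_pos hguard]
      apply IH _ (by omega) (i + 1) _ (by omega) rfl
        (by rw [markB_length n i h2 _ _ _ rfl]; exact hlen) ?_ t ht
      intro u hu
      rw [markB_getD n i h2 _ (i * i) sieve rfl hlen (by nlinarith) u hu]
      rw [Bool.and_eq_true, Bool.not_eq_true', decide_eq_false_iff_not]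
      constructor
      · rintro ⟨hold, hnew⟩
        have hS := (hstate u hu).mp hold
        refine ⟨hS.1, ?_⟩
        intro d hd2 hdlt hdvd hsq
        by_cases hdi : d < i
        · exact hS.2 d hd2 hdi hdvd hsq
        · have hdeq : d = i := by omega
          subst hdeq
          apply hnew
          refine ⟨hsq, ?_⟩
          have hh := dvd_sub hdvd (dvd_mul_right d d)
          exact hh
      · rintro ⟨hu2, hall⟩
        constructor
        · exact (hstate u hu).mpr ⟨hu2, fun d a b c => hall d a (by omega) c⟩
        · rintro ⟨hsq, hdvd⟩
          have hdu : i ∣ (u : Int) := by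
            have hh := dvd_add hdvd (dvd_mul_right i i)
            rwa [sub_add_cancel] at hh
          exact hall i (by omega) (by omega) hdu hsq
    · rw [if_neg hguard]
      -- sieve[i] already False: i is composite, so every multiple i would mark is
      -- already marked by a smaller divisor of i
      have hiN : ((i.toNat : Int)) = i := Int.toNat_of_nonneg (by omega)
      obtain ⟨d0, hd02, hd0i, hd0dvd, hd0sq⟩ :
          ∃ d0 : Int, 2 ≤ d0 ∧ d0 < i ∧ d0 ∣ i ∧ d0 * d0 ≤ i := by
        have hsti := hstate i.toNat (by omega)
        rw [hiN] at hsti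
        by_contra hno
        push Not at hno
        exact hguard (hsti.mpr ⟨by omega, fun d a b c => by have := hno d a b c; omega⟩)
      apply IH _ (by omega) (i + 1) sieve (by omega) rfl hlen ?_ t ht
      intro u hu
      rw [hstate u hu]
      constructor
      · rintro ⟨hu2, hrest⟩
        refine ⟨hu2, ?_⟩
        intro d hd2 hdlt hdvd hsq
        by_cases hdi : d < i
        · exact hrest d hd2 hdi hdvd hsq
        · have hdeq : d = i := by omega
          subst hdeq
          exact hrest d0 hd02 hd0i (hd0dvd.trans hdvd) (by nlinarith)
      · rintro ⟨hu2, hall⟩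
        exact ⟨hu2, fun d a b c => hall d a (by omega) c⟩
  · rw [dif_neg hg]
    rw [hstate t ht]
    constructor
    · rintro ⟨h1, hrest⟩
      refine ⟨h1, ?_⟩
      intro d hd2 hdvd hsq
      have hdlt : d < i := by
        by_contra hcon
        have hid : i ≤ d := by omega
        have : i * i ≤ d * d := mul_le_mul hid hid (by omega) (by omega)
        linarith
      exact hrest d hd2 hdlt hdvd hsq
    · rintro ⟨h1, hrest⟩
      exact ⟨h1, fun d a b c d' => hrest d a c d'⟩

-- ----- A's seen set never suppresses anything; the two generation loops agree -----

theorem loopAB (hi lo p : Int) (hpP : IntPrime p) :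
    ∀ (N : Nat) (k : Nat) (q s : Int) (cases : List (Int × Int × Int)) (seen : PySem.Set Int)
      (hp : 2 ≤ p) (hq : 1 ≤ q),
      (hi + 1 - q).toNat = N → q = p ^ k → 1 ≤ k →
      (∀ x ∈ seen,
        (∃ p' : Int, ∃ k' : Nat, IntPrime p' ∧ p' < p ∧ 1 ≤ k' ∧ x = p' ^ k') ∨
        (∃ k' : Nat, 1 ≤ k' ∧ k' < k ∧ x = p ^ k')) →
      (loopA hi lo p q s cases seen hp hq).1 = loopB hi lo p q s cases hp hq ∧
      (∀ x ∈ (loopA hi lo p q s cases seen hp hq).2,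
        x ∈ seen ∨ ∃ k' : Nat, 1 ≤ k' ∧ x = p ^ k') := by
  intro N
  induction N using Nat.strong_induction_on with
  | _ N IH =>
  intro k q s cases seen hp hq hN hqk hk1 hinv
  by_cases h : q ≤ hi
  · have hfresh : q ∉ seen := by
      intro hmem
      rcases hinv q hmem with ⟨p', k', hP', hlt, hk', hx⟩ | ⟨k', hk', hklt, hx⟩
      · exact pow_ne_of_primes hpP hP' (by omega) hk1 hk' (by rw [← hqk]; exact hx)
      · have hlt2 : p ^ k' < p ^ k := Int.pow_lt_pow_of_lt (by have := hpP.1; omega) hklt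
        rw [← hx, ← hqk] at hlt2
        exact lt_irrefl _ hlt2
    have hcont : ¬ (PySem.Set.contains seen q = true) := fun hc =>
      hfresh ((PySem.Set.contains_iff seen q).mp hc)
    have hq' : 1 ≤ q * p := by nlinarith
    have hqk' : q * p = p ^ (k + 1) := by rw [hqk, pow_succ]
    have hmeas : (hi + 1 - q * p).toNat < N := by
      have h1 : q + 1 ≤ q * p := by nlinarith
      generalize q * p = r at h1 ⊢
      omega
    rw [loopA, loopB, dif_pos h, dif_pos h]
    by_cases hlo : lo ≤ q
    · rw [if_pos ⟨hlo, hcont⟩, if_pos hlo]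
      have hinv' : ∀ x ∈ PySem.Set.add seen q,
          (∃ p' : Int, ∃ k' : Nat, IntPrime p' ∧ p' < p ∧ 1 ≤ k' ∧ x = p' ^ k') ∨
          (∃ k' : Nat, 1 ≤ k' ∧ k' < k + 1 ∧ x = p ^ k') := by
        intro x hx
        rcases (PySem.Set.mem_add seen q x).mp hx with hx' | heq
        · rcases hinv x hx' with hl | ⟨k', a, b, c⟩
          · exact Or.inl hl
          · exact Or.inr ⟨k', a, by omega, c⟩
        · exact Or.inr ⟨k, hk1, by omega, by rw [heq]; exact hqk⟩
      obtain ⟨IH1, IH2⟩ := IH _ hmeas (k + 1) (q * p) (s + 1) (cases ++ [(q, p, s)])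
        (PySem.Set.add seen q) hp hq' rfl hqk' (by omega) hinv'
      refine ⟨IH1, ?_⟩
      intro x hx
      rcases IH2 x hx with hx' | hpow
      · rcases (PySem.Set.mem_add seen q x).mp hx' with h1 | heq
        · exact Or.inl h1
        · exact Or.inr ⟨k, hk1, by rw [heq]; exact hqk⟩
      · exact Or.inr hpow
    · rw [if_neg (by rintro ⟨h1, -⟩; exact hlo h1), if_neg hlo]
      have hinv' : ∀ x ∈ seen,
          (∃ p' : Int, ∃ k' : Nat, IntPrime p' ∧ p' < p ∧ 1 ≤ k' ∧ x = p' ^ k') ∨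
          (∃ k' : Nat, 1 ≤ k' ∧ k' < k + 1 ∧ x = p ^ k') := by
        intro x hx
        rcases hinv x hx with hl | ⟨k', a, b, c⟩
        · exact Or.inl hl
        · exact Or.inr ⟨k', a, by omega, c⟩
      obtain ⟨IH1, IH2⟩ := IH _ hmeas (k + 1) (q * p) (s + 1) cases seen hp hq' rfl hqk'
        (by omega) hinv'
      exact ⟨IH1, fun x hx => IH2 x hx⟩
  · rw [loopA, loopB, dif_neg h, dif_neg h]
    exact ⟨rfl, fun x hx => Or.inl hx⟩

theorem mainAB (hi lo : Int) (sieve : List Bool)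
    (hs : ∀ t : Int, 2 ≤ t → t ≤ hi → (sieve.getD t.toNat false = true ↔ IntPrime t)) :
    ∀ (N : Nat) (p : Int) (cases : List (Int × Int × Int)) (seen : PySem.Set Int) (hp : 2 ≤ p),
      (hi + 1 - p).toNat = N →
      (∀ x ∈ seen, ∃ p' : Int, ∃ k' : Nat, IntPrime p' ∧ p' < p ∧ 1 ≤ k' ∧ x = p' ^ k') →
      (mainA hi lo p cases seen).1 = mainB hi lo sieve p cases hp := by
  intro N
  induction N using Nat.strong_induction_on with
  | _ N IH =>
  intro p cases seen hp hN hinv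
  rw [mainA, mainB]
  by_cases h : p ≤ hi
  · rw [dif_pos h, dif_pos h]
    have hguard : is_prime p = true ↔ sieve.getD p.toNat false = true := by
      rw [is_prime_iff, hs p hp h]
    by_cases hprime : is_prime p = true
    · rw [dif_pos hprime, if_pos (hguard.mp hprime)]
      have hpP : IntPrime p := (is_prime_iff p).mp hprime
      obtain ⟨L1, L2⟩ := loopAB hi lo p hpP _ 1 p 1 cases seen (pv_two_le_of_is_prime hprime)
        (pv_one_le (pv_two_le_of_is_prime hprime)) rfl (by rw [pow_one]) (by omega)
        (fun x hx => Or.inl (by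
          rcases hinv x hx with ⟨p', k', a, b, c, d⟩
          exact ⟨p', k', a, b, c, d⟩))
      have hinvNew : ∀ x ∈ (loopA hi lo p p 1 cases seen (pv_two_le_of_is_prime hprime)
          (pv_one_le (pv_two_le_of_is_prime hprime))).2,
          ∃ p' : Int, ∃ k' : Nat, IntPrime p' ∧ p' < p + 1 ∧ 1 ≤ k' ∧ x = p' ^ k' := by
        intro x hx
        rcases L2 x hx with hseen | ⟨k', hk', hxk⟩
        · rcases hinv x hseen with ⟨p', k', a, b, c, d⟩
          exact ⟨p', k', a, by omega, c, d⟩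
        · exact ⟨p, k', hpP, by omega, hk', hxk⟩
      have hrec := IH _ (by omega) (p + 1)
        (loopA hi lo p p 1 cases seen (pv_two_le_of_is_prime hprime)
          (pv_one_le (pv_two_le_of_is_prime hprime))).1
        (loopA hi lo p p 1 cases seen (pv_two_le_of_is_prime hprime)
          (pv_one_le (pv_two_le_of_is_prime hprime))).2
        (by omega) rfl hinvNew
      rw [hrec, L1]
    · rw [dif_neg hprime, if_neg (fun hg => hprime (hguard.mpr hg))]
      exact IH _ (by omega) (p + 1) cases seen (by omega) rfl
        (fun x hx => by
          rcases hinv x hx with ⟨p', k', a, b, c, d⟩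
          exact ⟨p', k', a, by omega, c, d⟩)
  · rw [dif_neg h, dif_neg h]

theorem mainA_low (hi lo : Int) :
    ∀ (N : Nat) (p : Int) (cases : List (Int × Int × Int)) (seen : PySem.Set Int),
      p ≤ 2 → (2 - p).toNat = N →
      mainA hi lo p cases seen = mainA hi lo 2 cases seen := by
  intro N
  induction N using Nat.strong_induction_on with
  | _ N IH =>
  intro p cases seen hp2 hN
  rcases eq_or_lt_of_le hp2 with heq | hlt
  · rw [heq]
  · rw [mainA]
    by_cases h : p ≤ hi
    · rw [dif_pos h, dif_neg (by rw [is_prime_of_lt_two hlt]; simp)]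
      exact IH _ (by omega) (p + 1) cases seen (by omega) rfl
    · rw [dif_neg h]
      rw [mainA, dif_neg (by omega : ¬ (2 : Int) ≤ hi)]

-- ===== VERDICT (by name: the statement is the Claim_ definition above) =====
theorem generate_prime_powers_spec : Claim_equal_generate_prime_powers := by
  intro lo hi char_min hdom
  show generate_prime_powers lo hi char_min = generate_prime_powers_alt lo hi char_min
  rw [generate_prime_powers, generate_prime_powers_alt]
  apply congrArg (fun l => PySem.List.sorted l (fun x : Int × Int × Int => x.1) false)
  by_cases hcond : max char_min 2 ≤ hi
  · rw [dif_pos hcond]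
    have h2 : 2 ≤ hi := le_trans (le_max_right _ _) hcond
    have hinit : ∀ t : Nat, (t : Int) ≤ hi →
        ((((List.replicate (hi + 1).toNat true).set 0 false).set 1 false).getD t false = true ↔
          (2 ≤ (t : Int) ∧ ∀ d : Int, 2 ≤ d → d < 2 → d ∣ (t : Int) → ¬ d * d ≤ (t : Int))) := by
      intro t ht
      have hlen : t < (hi + 1).toNat := by omega
      by_cases ht0 : t = 0
      · subst ht0
        have hv : (((List.replicate (hi + 1).toNat true).set 0 false).set 1 false).getD 0 false
            = false := by
          simp [List.getD_eq_getElem?_getD, List.length_set, List.length_replicate, hlen]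
        rw [hv]
        constructor
        · intro hh; cases hh
        · rintro ⟨hh, -⟩; omega
      · by_cases ht1 : t = 1
        · subst ht1
          have hv : (((List.replicate (hi + 1).toNat true).set 0 false).set 1 false).getD 1 false
              = false := by
            simp [List.getD_eq_getElem?_getD, List.length_set, List.length_replicate, hlen]
          rw [hv]
          constructor
          · intro hh; cases hh
          · rintro ⟨hh, -⟩; omega
        · have hv : (((List.replicate (hi + 1).toNat true).set 0 false).set 1 false).getD t false
              = true := by
            have h0 : (0 : Nat) ≠ t := fun hh => ht0 hh.symm
            have h1 : (1 : Nat) ≠ t := fun hh => ht1 hh.symm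
            simp [List.getD_eq_getElem?_getD, h0, h1, hlen]
          rw [hv]
          simp only [true_iff]
          exact ⟨by omega, fun d a b => by omega⟩
    have hlen0 : (((((List.replicate (hi + 1).toNat true).set 0 false).set 1 false)).length : Int)
        = hi + 1 := by
      simp [List.length_set, List.length_replicate]
      omega
    have hsieve := sieveLoopB_getD hi _ 2 _ (le_refl 2) rfl hlen0 hinit
    have hs : ∀ t : Int, 2 ≤ t → t ≤ hi →
        ((sieveLoopB hi 2 (((List.replicate (hi + 1).toNat true).set 0 false).set 1 false)
          (le_refl 2)).getD t.toNat false = true ↔ IntPrime t) := by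
      intro t h2t hthi
      have hh := hsieve t.toNat (by omega)
      rw [Int.toNat_of_nonneg (by omega : (0 : Int) ≤ t)] at hh
      exact hh
    by_cases hcm : 2 ≤ char_min
    · conv_lhs => rw [show char_min = max char_min 2 from by omega]
      exact mainAB hi lo _ hs _ (max char_min 2) [] PySem.Set.empty (le_max_right _ _) rfl
        (fun x hx => by cases hx)
    · conv_lhs => rw [mainA_low hi lo _ char_min [] PySem.Set.empty (by omega) rfl,
        show (2 : Int) = max char_min 2 from by omega]
      exact mainAB hi lo _ hs _ (max char_min 2) [] PySem.Set.empty (le_max_right _ _) rfl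
        (fun x hx => by cases hx)
  · rw [dif_neg hcond]
    by_cases hcm : char_min ≤ 2
    · rw [mainA_low hi lo _ char_min [] PySem.Set.empty hcm rfl,
        mainA, dif_neg (fun hh => hcond (max_le (by omega) hh))]
    · rw [mainA, dif_neg (fun hh => hcond (max_le hh (by omega)))]
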